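-- pv_equiv track=rewrite | github.com/NRM87/ArtistAgent | artist_agent/backends.py | _split_cli_model_spec
-- ===== SOURCE A (Python) =====
-- from typing import Dict, List, Optional, Tuple
--
-- def _split_cli_model_spec(cli_default: str, model_spec: str) -> Tuple[str, str]:
--     cli = str(cli_default).strip().lower() or "gemini"
--     spec = str(model_spec).strip()
--     if not spec:
--         return cli, ""
--     low = spec.lower()
--     if low in ("gemini", "codex"):
--         return low, ""
--     for prefix in ("gemini:", "codex:"):
--         if low.startswith(prefix):
--             return prefix[:-1], spec.split(":", 1)[1].strip()
--     return cli, spec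
-- ===== SOURCE B (Python) =====
-- from typing import Tuple
--
-- def _split_cli_model_spec(cli_default: str, model_spec: str) -> Tuple[str, str]:
--     cli = str(cli_default).strip().lower() or "gemini"
--     spec = str(model_spec).strip()
--     if not spec:
--         return cli, ""
--     parts = spec.split(":", 1)
--     head = parts[0].lower()
--     if head in ("gemini", "codex"):
--         return head, parts[1].strip() if len(parts) == 2 else ""
--     return cli, spec
-- ===== Notes on version B (the rewrite author's own statement) =====
-- stated objective: simpler
-- what changed: B splits the spec once at the first ':' and dispatches on whether the lowercased head is a known backend, replacing A's separate exact-equality test plus the unrolled startswith-prefix loop (which re-splits inside the loop).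
import Mathlib
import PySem

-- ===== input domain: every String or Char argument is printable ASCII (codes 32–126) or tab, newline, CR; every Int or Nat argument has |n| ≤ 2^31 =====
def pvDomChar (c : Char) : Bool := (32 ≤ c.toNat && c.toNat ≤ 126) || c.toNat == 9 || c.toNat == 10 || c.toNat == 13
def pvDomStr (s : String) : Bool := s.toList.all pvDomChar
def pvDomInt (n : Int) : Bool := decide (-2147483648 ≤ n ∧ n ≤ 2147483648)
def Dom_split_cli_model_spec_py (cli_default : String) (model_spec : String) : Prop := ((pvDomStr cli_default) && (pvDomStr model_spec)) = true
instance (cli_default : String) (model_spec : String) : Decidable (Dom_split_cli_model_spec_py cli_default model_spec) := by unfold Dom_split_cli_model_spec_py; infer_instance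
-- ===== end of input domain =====

-- B replaces A's exact-equality test plus the unrolled startswith-prefix loop by one split at the
-- first ':' followed by a membership test on the lowercased head (objective: simpler decomposition).

-- ===== PORT A =====
-- spec.split(":", 1)[1].strip(); when A evaluates it a ':' is present, so the split has two pieces
def pvA_splitTail (parts : Option (List String)) : String :=
  match parts with
  | some (_ :: t :: _) => PySem.Str.strip t
  | _ => ""

def split_cli_model_spec_py (cli_default : String) (model_spec : String) : String × String :=
  let cli0 := PySem.Str.lower (PySem.Str.strip cli_default)
  let cli := if cli0 = "" then "gemini" else cli0
  let spec := PySem.Str.strip model_spec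
  if spec = "" then (cli, "")
  else
    let low := PySem.Str.lower spec
    if low = "gemini" ∨ low = "codex" then (low, "")
    else if PySem.Str.startswith low "gemini:" then
      ("gemini", pvA_splitTail (PySem.Str.splitMax? spec ":" 1))
    else if PySem.Str.startswith low "codex:" then
      ("codex", pvA_splitTail (PySem.Str.splitMax? spec ":" 1))
    else (cli, spec)

-- ===== PORT B =====
-- parts[1].strip() if len(parts) == 2 else ""
def pvB_arg (rest : List String) : String :=
  match rest with
  | t :: _ => PySem.Str.strip t
  | [] => ""

-- if head in ("gemini", "codex"): (head, parts[1]-strip)  else the (cli, spec) fallback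
def pvB_dispatch (cli spec : String) (parts : Option (List String)) : String × String :=
  match parts with
  | some (h :: rest) =>
      let head := PySem.Str.lower h
      if head = "gemini" ∨ head = "codex" then (head, pvB_arg rest)
      else (cli, spec)
  | _ => (cli, spec)          -- unreachable: split always yields ≥ 1 piece

def split_cli_model_spec_py_alt (cli_default : String) (model_spec : String) : String × String :=
  let cli0 := PySem.Str.lower (PySem.Str.strip cli_default)
  let cli := if cli0 = "" then "gemini" else cli0
  let spec := PySem.Str.strip model_spec
  if spec = "" then (cli, "")
  else pvB_dispatch cli spec (PySem.Str.splitMax? spec ":" 1)   -- parts = spec.split(":", 1); ":" ≠ "" so some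

-- ===== PRECONDITION & SPEC =====
def Spec_split_cli_model_spec_py (cli_default : String) (model_spec : String) (out : String × String) : Prop := out = split_cli_model_spec_py_alt cli_default model_spec
instance (cli_default : String) (model_spec : String) (out : String × String) : Decidable (Spec_split_cli_model_spec_py cli_default model_spec out) := by unfold Spec_split_cli_model_spec_py; infer_instance

-- ===== CLAIM (what is proved, stated in full; the proofs are below) =====
def Claim_equal_split_cli_model_spec_py : Prop := ∀ (cli_default : String) (model_spec : String), Dom_split_cli_model_spec_py cli_default model_spec → Spec_split_cli_model_spec_py cli_default model_spec (split_cli_model_spec_py cli_default model_spec)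

-- ===== LEMMAS AND PROOFS =====

-- splitOnMax.go with maxsplit budget 0 copies everything that is left as one last piece
theorem pv_go0 (sep : List Char) (fuel : Nat) (l cur : List Char) (acc : List (List Char)) :
    PySem.Chars.splitOnMax.go sep fuel 0 l cur acc = ((cur.reverse ++ l) :: acc).reverse := by
  cases fuel <;> cases l <;> simp [PySem.Chars.splitOnMax.go]

theorem pv_go1 (c : Char) (l : List Char) : ∀ (fuel : Nat) (cur : List Char) (acc : List (List Char)),
    l.length < fuel →
    (c ∉ l → PySem.Chars.splitOnMax.go [c] fuel 1 l cur acc = acc.reverse ++ [cur.reverse ++ l]) ∧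
    (c ∈ l → ∃ p t, c ∉ p ∧ l = p ++ c :: t ∧
      PySem.Chars.splitOnMax.go [c] fuel 1 l cur acc = acc.reverse ++ [cur.reverse ++ p, t]) := by
  induction l with
  | nil =>
    intro fuel cur acc hf
    cases fuel with
    | zero => omega
    | succ f =>
      constructor
      · intro _; simp [PySem.Chars.splitOnMax.go]
      · intro h; simp at h
  | cons a rest ih =>
    intro fuel cur acc hf
    cases fuel with
    | zero => omega
    | succ f =>
      have hf' : rest.length < f := by simpa using hf
      by_cases hca : c = a
      · subst hca
        have hgo : PySem.Chars.splitOnMax.go [c] (f+1) 1 (c :: rest) cur acc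
            = PySem.Chars.splitOnMax.go [c] f 0 rest [] (cur.reverse :: acc) := by
          simp [PySem.Chars.splitOnMax.go, List.isPrefixOf]
        constructor
        · intro h; simp at h
        · intro _
          exact ⟨[], rest, by simp, by simp, by
            rw [hgo, pv_go0]; simp⟩
      · have hgo : PySem.Chars.splitOnMax.go [c] (f+1) 1 (a :: rest) cur acc
            = PySem.Chars.splitOnMax.go [c] f 1 rest (a :: cur) acc := by
          simp [PySem.Chars.splitOnMax.go, List.isPrefixOf, hca]
        obtain ⟨h1, h2⟩ := ih f (a :: cur) acc hf'
        constructor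
        · intro h
          have : c ∉ rest := fun hm => h (List.mem_cons_of_mem _ hm)
          rw [hgo, h1 this]; simp
        · intro h
          have hm : c ∈ rest := by
            rcases List.mem_cons.mp h with h' | h'
            · exact absurd h' hca
            · exact h'
          obtain ⟨p, t, hp, he, hr⟩ := h2 hm
          exact ⟨a :: p, t, by
            intro hcp
            rcases List.mem_cons.mp hcp with h' | h'
            · exact hca h'
            · exact hp h', by simp [he], by rw [hgo, hr]; simp⟩

theorem pv_split_mem (s : List Char) (c : Char) (hc : c ∈ s) :
    ∃ p t, c ∉ p ∧ s = p ++ c :: t ∧ PySem.Chars.splitOnMax s [c] 1 = [p, t] := by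
  have h := (pv_go1 c s (s.length + 1) [] [] (by omega)).2 hc
  obtain ⟨p, t, hp, he, hr⟩ := h
  refine ⟨p, t, hp, he, ?_⟩
  unfold PySem.Chars.splitOnMax
  rw [if_neg (by norm_num)]
  simpa using hr

theorem pv_split_not (s : List Char) (c : Char) (hc : c ∉ s) :
    PySem.Chars.splitOnMax s [c] 1 = [s] := by
  have h := (pv_go1 c s (s.length + 1) [] [] (by omega)).1 hc
  unfold PySem.Chars.splitOnMax
  rw [if_neg (by norm_num)]
  simpa using h

theorem pv_lowerChar_colon (c : Char) (h : PySem.Chars.lowerChar c = ':') : c = ':' := by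
  unfold PySem.Chars.lowerChar PySem.Chars.isupper at h
  split_ifs at h with hu
  · exfalso
    simp only [Bool.and_eq_true, decide_eq_true_eq] at hu
    have h1 : 65 ≤ c.toNat := hu.1
    have h2 : c.toNat ≤ 90 := hu.2
    have hv : Nat.isValidChar (c.toNat + 32) := Or.inl (by omega)
    have h' := congrArg Char.toNat h
    rw [Char.toNat_ofNat, if_pos hv] at h'
    have : c.toNat + 32 = 58 := h'
    omega
  · exact h

theorem pv_colon_mem_lower (p : List Char) (h : ':' ∈ PySem.Chars.lower p) : ':' ∈ p := by
  simp only [PySem.Chars.lower, List.mem_map] at h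
  obtain ⟨c, hc, he⟩ := h
  rwa [pv_lowerChar_colon c he] at hc

theorem pv_pref_unique (c : Char) (u : List Char) : ∀ (v w : List Char), c ∉ u → c ∉ v →
    (v ++ [c]) <+: (u ++ c :: w) → v = u := by
  induction u with
  | nil =>
    intro v w _ hv hpre
    cases v with
    | nil => rfl
    | cons x v' =>
      exfalso
      rw [List.cons_append, List.nil_append, List.cons_prefix_cons] at hpre
      exact hv (hpre.1 ▸ List.mem_cons_self)
  | cons a u' ih =>
    intro v w hu hv hpre
    cases v with
    | nil =>
      exfalso
      rw [List.nil_append, List.cons_append, List.cons_prefix_cons] at hpre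
      exact hu (hpre.1 ▸ List.mem_cons_self)
    | cons x v' =>
      rw [List.cons_append, List.cons_append, List.cons_prefix_cons] at hpre
      have hu' : c ∉ u' := fun hm => hu (List.mem_cons_of_mem _ hm)
      have hv' : c ∉ v' := fun hm => hv (List.mem_cons_of_mem _ hm)
      rw [hpre.1, ih v' w hu' hv' hpre.2]

-- splitMax? on a String, routed through the characterizations above
theorem pv_strSplit (spec : String) :
    PySem.Str.splitMax? spec ":" 1
      = some (List.map String.ofList (PySem.Chars.splitOnMax spec.toList [':'] 1)) := by
  simp [PySem.Str.splitMax?, PySem.Chars.splitMax?]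

theorem pv_lower_toList (s : String) :
    (PySem.Str.lower s).toList = PySem.Chars.lower s.toList := by
  simp [PySem.Str.lower]

theorem pv_main (cli_default model_spec : String) :
    split_cli_model_spec_py cli_default model_spec = split_cli_model_spec_py_alt cli_default model_spec := by
  unfold split_cli_model_spec_py split_cli_model_spec_py_alt pvB_dispatch pvB_arg pvA_splitTail
  set cli0 := PySem.Str.lower (PySem.Str.strip cli_default) with hcli0
  set cli := if cli0 = "" then "gemini" else cli0 with hcli
  set spec := PySem.Str.strip model_spec with hspecdef
  by_cases hspec : spec = ""
  · simp [hspec]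
  · rw [if_neg hspec, if_neg hspec]
    set low := PySem.Str.lower spec with hlow
    by_cases hc : ':' ∈ spec.toList
    · obtain ⟨p, t, hp, hs, hsplit⟩ := pv_split_mem spec.toList ':' hc
      rw [pv_strSplit, hsplit]
      simp only [List.map_cons, List.map_nil]
      have hlowlist : low.toList = PySem.Chars.lower p ++ ':' :: PySem.Chars.lower t := by
        rw [hlow, pv_lower_toList, hs]
        simp [PySem.Chars.lower]
        rfl
      have hheadlist : (PySem.Str.lower (String.ofList p)).toList = PySem.Chars.lower p := by
        rw [pv_lower_toList]; simp
      have hplow : ':' ∉ PySem.Chars.lower p := fun hm => hp (pv_colon_mem_lower p hm)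
      have hlow_ne_g : low ≠ "gemini" := by
        intro h
        have h2 := congrArg String.toList h
        rw [hlowlist] at h2
        have h3 : ':' ∈ "gemini".toList := by
          rw [← h2]; exact List.mem_append_right _ List.mem_cons_self
        simp at h3
      have hlow_ne_c : low ≠ "codex" := by
        intro h
        have h2 := congrArg String.toList h
        rw [hlowlist] at h2
        have h3 : ':' ∈ "codex".toList := by
          rw [← h2]; exact List.mem_append_right _ List.mem_cons_self
        simp at h3
      have hsw_g : PySem.Str.startswith low "gemini:" = true ↔ PySem.Chars.lower p = "gemini".toList := by
        rw [PySem.Str.startswith_eq, PySem.Chars.startswith_iff]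
        constructor
        · intro h
          rw [hlowlist] at h
          exact (pv_pref_unique ':' (PySem.Chars.lower p) "gemini".toList (PySem.Chars.lower t) hplow (by decide) h).symm
        · intro h
          rw [hlowlist, h]
          exact ⟨PySem.Chars.lower t, by simp⟩
      have hsw_c : PySem.Str.startswith low "codex:" = true ↔ PySem.Chars.lower p = "codex".toList := by
        rw [PySem.Str.startswith_eq, PySem.Chars.startswith_iff]
        constructor
        · intro h
          rw [hlowlist] at h
          exact (pv_pref_unique ':' (PySem.Chars.lower p) "codex".toList (PySem.Chars.lower t) hplow (by decide) h).symm
        · intro h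
          rw [hlowlist, h]
          exact ⟨PySem.Chars.lower t, by simp⟩
      have hhead_g : PySem.Str.lower (String.ofList p) = "gemini" ↔ PySem.Chars.lower p = "gemini".toList := by
        rw [← String.toList_inj, hheadlist]
      have hhead_c : PySem.Str.lower (String.ofList p) = "codex" ↔ PySem.Chars.lower p = "codex".toList := by
        rw [← String.toList_inj, hheadlist]
      have horc : ¬(low = "gemini" ∨ low = "codex") := by
        rintro (h | h)
        · exact hlow_ne_g h
        · exact hlow_ne_c h
      by_cases hg : PySem.Chars.lower p = "gemini".toList
      · rw [if_neg horc, if_pos (hsw_g.mpr hg), if_pos (Or.inl (hhead_g.mpr hg)), hhead_g.mpr hg]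
      · by_cases hx : PySem.Chars.lower p = "codex".toList
        · have h1 : ¬ PySem.Str.startswith low "gemini:" = true := fun h => hg (hsw_g.mp h)
          rw [if_neg horc, if_neg h1, if_pos (hsw_c.mpr hx), if_pos (Or.inr (hhead_c.mpr hx)), hhead_c.mpr hx]
        · have h1 : ¬ PySem.Str.startswith low "gemini:" = true := fun h => hg (hsw_g.mp h)
          have h2 : ¬ PySem.Str.startswith low "codex:" = true := fun h => hx (hsw_c.mp h)
          have hng : ¬(PySem.Str.lower (String.ofList p) = "gemini" ∨ PySem.Str.lower (String.ofList p) = "codex") := by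
            rintro (h | h)
            · exact hg (hhead_g.mp h)
            · exact hx (hhead_c.mp h)
          rw [if_neg horc, if_neg h1, if_neg h2, if_neg hng]
    · rw [pv_strSplit, pv_split_not spec.toList ':' hc]
      simp only [List.map_cons, List.map_nil, String.ofList_toList]
      have h1 : ¬ PySem.Str.startswith low "gemini:" = true := by
        rw [PySem.Str.startswith_eq, PySem.Chars.startswith_iff]
        intro h
        have hm : ':' ∈ low.toList := h.subset (by decide)
        rw [hlow, pv_lower_toList] at hm
        exact hc (pv_colon_mem_lower _ hm)
      have h2 : ¬ PySem.Str.startswith low "codex:" = true := by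
        rw [PySem.Str.startswith_eq, PySem.Chars.startswith_iff]
        intro h
        have hm : ':' ∈ low.toList := h.subset (by decide)
        rw [hlow, pv_lower_toList] at hm
        exact hc (pv_colon_mem_lower _ hm)
      rw [← hlow]
      by_cases hlg : low = "gemini" ∨ low = "codex"
      · rw [if_pos hlg, if_pos hlg]
      · rw [if_neg hlg, if_neg h1, if_neg h2, if_neg hlg]

-- ===== VERDICT (by name: the statement is the Claim_ definition above) =====
theorem split_cli_model_spec_py_spec : Claim_equal_split_cli_model_spec_py := by
  unfold Claim_equal_split_cli_model_spec_py Spec_split_cli_model_spec_py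
  intro cli_default model_spec _
  exact pv_main cli_default model_spec
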